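-- pv_equiv track=rewrite | github.com/Doldolee/MORE-CLEAR | dataset/util.py | extract_background_states
-- ===== SOURCE A (Python) =====
-- def extract_background_states(notes, done, missing='no clinical note'):
--     """
--     notes: list of str
--     done: list of bool/int, True at episode boundaries
--     missing: placeholder for missing notes
--     returns: list of str, each entry is either "[context] first_valid_note" or the missing placeholder
--     """
--     backgrounds = []
--     first_valid = None
--
--     for note, is_done in zip(notes, done):
--         if first_valid is None and note != missing:
--             first_valid = note
--
--
--         if first_valid is None:
--             backgrounds.append(missing)
--         else:
--             backgrounds.append(f"[context] {first_valid}")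
--
--
--         if is_done:
--             first_valid = None
--
--     return backgrounds
-- ===== SOURCE B (Python) =====
-- def extract_background_states(notes, done, missing='no clinical note'):
--     def fill(seg):
--         for i, x in enumerate(seg):
--             if x != missing:
--                 return [missing] * i + [f"[context] {x}"] * (len(seg) - i)
--         return [missing] * len(seg)
--
--     backgrounds = []
--     buf = []
--     for note, is_done in zip(notes, done):
--         buf.append(note)
--         if is_done:
--             backgrounds += fill(buf)
--             buf = []
--     backgrounds += fill(buf)
--     return backgrounds
-- ===== Notes on version B (the rewrite author's own statement) =====
-- stated objective: alternative
-- what changed: B buffers each episode segment and fills it in one batch (missing prefix, then constant '[context] first_valid' suffix) instead of A's per-item incremental first_valid state machine.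
import Mathlib
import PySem

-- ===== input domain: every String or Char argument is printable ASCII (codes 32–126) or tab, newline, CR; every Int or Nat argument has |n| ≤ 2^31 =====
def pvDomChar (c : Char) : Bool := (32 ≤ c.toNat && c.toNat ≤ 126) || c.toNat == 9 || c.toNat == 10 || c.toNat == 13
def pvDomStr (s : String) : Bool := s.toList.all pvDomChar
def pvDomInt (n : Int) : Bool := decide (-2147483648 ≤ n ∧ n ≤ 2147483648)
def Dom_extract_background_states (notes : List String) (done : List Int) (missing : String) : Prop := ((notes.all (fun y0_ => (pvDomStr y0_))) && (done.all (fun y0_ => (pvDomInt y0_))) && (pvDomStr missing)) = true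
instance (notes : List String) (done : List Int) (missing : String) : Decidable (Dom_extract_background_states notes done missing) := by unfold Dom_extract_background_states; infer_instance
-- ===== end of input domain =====

-- B buffers each episode segment and fills it in one batch instead of A's incremental
-- first_valid state machine (objective: alternative decomposition, same cost).


-- ===== PORT A =====
-- A's loop over zip(notes, done) with the running state first_valid : Option String;
-- each iteration emits one output (cons-structured recursion over the zipped list).
def pvALoop (missing : String) : List (String × Int) → Option String → List String
  | [], _ => []
  | (note, d) :: rest, fv =>
    let fv' := if fv = none ∧ note ≠ missing then some note else fv
    let out := match fv' with
      | none => missing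
      | some v => "[context] " ++ v            -- f"[context] {first_valid}"
    out :: pvALoop missing rest (if d ≠ 0 then none else fv')

def extract_background_states (notes : List String) (done : List Int) (missing : String) : List String :=
  pvALoop missing (notes.zip done) none

-- ===== PORT B =====
-- fill(seg): missing for positions before the first note ≠ missing, then a constant
-- "[context] first_valid" for the rest of the segment (Source B's fill, index scan as recursion).
def pvFill (missing : String) : List String → List String
  | [] => []
  | x :: rest =>
    if x ≠ missing then List.replicate (rest.length + 1) ("[context] " ++ x)
    else missing :: pvFill missing rest

-- Source B's main loop: accumulate the current segment buffer, flush it through fill at each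
-- boundary, and flush the trailing unterminated buffer at the end.
def pvBLoop (missing : String) : List (String × Int) → List String → List String
  | [], buf => pvFill missing buf
  | (n, d) :: rest, buf =>
    if d ≠ 0 then pvFill missing (buf ++ [n]) ++ pvBLoop missing rest []
    else pvBLoop missing rest (buf ++ [n])

def extract_background_states_alt (notes : List String) (done : List Int) (missing : String) : List String :=
  pvBLoop missing (notes.zip done) []

-- ===== PRECONDITION & SPEC =====
def Spec_extract_background_states (notes : List String) (done : List Int) (missing : String) (out : List String) : Prop := out = extract_background_states_alt notes done missing
instance (notes : List String) (done : List Int) (missing : String) (out : List String) : Decidable (Spec_extract_background_states notes done missing out) := by unfold Spec_extract_background_states; infer_instance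

-- ===== CLAIM (what is proved, stated in full; the proofs are below) =====
def Claim_equal_extract_background_states : Prop := ∀ (notes : List String) (done : List Int) (missing : String), Dom_extract_background_states notes done missing → Spec_extract_background_states notes done missing (extract_background_states notes done missing)

-- ===== LEMMAS AND PROOFS =====

-- first note ≠ missing in a segment, as maintained incrementally by A
def pvFirstValid (missing : String) : List String → Option String
  | [] => none
  | x :: rest => if x = missing then pvFirstValid missing rest else some x

theorem pvFirstValid_snoc (missing n : String) (buf : List String) :
    pvFirstValid missing (buf ++ [n]) =
      if pvFirstValid missing buf = none ∧ n ≠ missing then some n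
      else pvFirstValid missing buf := by
  induction buf with
  | nil => by_cases hn : n = missing <;> simp [pvFirstValid, hn]
  | cons x buf ih =>
    simp only [List.cons_append, pvFirstValid]
    by_cases hx : x = missing <;> simp [hx, ih]

theorem pvFill_snoc (missing n : String) (buf : List String) :
    pvFill missing (buf ++ [n]) =
      pvFill missing buf ++
        [match pvFirstValid missing (buf ++ [n]) with
          | none => missing
          | some v => "[context] " ++ v] := by
  induction buf with
  | nil =>
    by_cases hn : n = missing <;> simp [pvFill, pvFirstValid, hn, List.replicate]
  | cons x buf ih =>
    by_cases hx : x = missing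
    · simp [pvFill, pvFirstValid, hx, ih]
    · simp only [List.cons_append, pvFill, pvFirstValid, hx, ite_not]
      simp [List.length_append, List.replicate_succ' (n := buf.length + 1)]

theorem pvLoop_eq (missing : String) (l : List (String × Int)) :
    ∀ buf : List String,
      pvBLoop missing l buf = pvFill missing buf ++ pvALoop missing l (pvFirstValid missing buf) := by
  induction l with
  | nil => intro buf; simp [pvBLoop, pvALoop]
  | cons p rest ih =>
    intro buf
    obtain ⟨n, d⟩ := p
    simp only [pvBLoop, pvALoop]
    by_cases hd : d ≠ 0
    · simp only [if_pos hd, ih [], pvFill_snoc, pvFirstValid_snoc, pvFill, pvFirstValid]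
      simp
    · simp only [if_neg hd, ih (buf ++ [n]), pvFill_snoc, pvFirstValid_snoc]
      simp

-- ===== VERDICT (by name: the statement is the Claim_ definition above) =====
theorem extract_background_states_spec : Claim_equal_extract_background_states := by
  intro notes done missing _
  show extract_background_states notes done missing = extract_background_states_alt notes done missing
  rw [extract_background_states, extract_background_states_alt, pvLoop_eq]
  simp [pvFill, pvFirstValid]
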